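-- pv_equiv track=rewrite | github.com/625781186/lgd_spiders | others/demo/去除字符串的括号.py | DeleteBrackets
-- ===== SOURCE A (Python) =====
-- def DeleteBrackets(is_str):
--     """
--     去除多层括号的最外层，返回内层括号
--     使用tag作为计数变量，表示当前括号层数，
--     当层数为零时跳出循环，返回当前括号的内层字符串
--     :param is_str:
--     :return:
--     """
--     str1 = is_str
--     result = ''
--     str_len = len(str1)
--
--     for i in range(str_len):
--         if str1[i] == '(':          # 遇到左括号进入判断
--             tag = 1                 # tag标为1
--             stack = []              # 用list作为栈，遍历到的元素依次压栈
--
--             for j in range(i + 1, str_len):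
--                 stack.append(str1[j])           # 压栈
--                 if str1[j] == ')' and tag:
--                     tag -= 1                    # 遇到右括号括号层数减1
--                 if str1[j] == '(' and tag:
--                     tag += 1                    # 遇到左括号括号层数加1
--                 if tag == 0:                    # 层数为0 跳出循环
--                     stack.pop()                 # 去除最外层循环，所以丢弃最后一个右括号
--                     for k in stack:
--                         result += k             # 将列表拼接成字符串输出
--                     break
--     return result
-- ===== SOURCE B (Python) =====
-- def DeleteBrackets(is_str):
--     # One pass pairs each '(' with its matching ')' via an index stack,
--     # then the result is the join of the inner slices in opening order.
--     match = {}
--     stack = []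
--     for i, c in enumerate(is_str):
--         if c == '(':
--             stack.append(i)
--         elif c == ')' and stack:
--             match[stack.pop()] = i
--     return ''.join(is_str[i + 1:match[i]] for i in range(len(is_str)) if i in match)
-- ===== Notes on version B (the rewrite author's own statement) =====
-- stated objective: alternative
-- what changed: Replaces A's nested depth-counting rescan from each open bracket by a single stack pass that builds an open-index-to-close-index map, then joins the inner slices in opening order.
import Mathlib
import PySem

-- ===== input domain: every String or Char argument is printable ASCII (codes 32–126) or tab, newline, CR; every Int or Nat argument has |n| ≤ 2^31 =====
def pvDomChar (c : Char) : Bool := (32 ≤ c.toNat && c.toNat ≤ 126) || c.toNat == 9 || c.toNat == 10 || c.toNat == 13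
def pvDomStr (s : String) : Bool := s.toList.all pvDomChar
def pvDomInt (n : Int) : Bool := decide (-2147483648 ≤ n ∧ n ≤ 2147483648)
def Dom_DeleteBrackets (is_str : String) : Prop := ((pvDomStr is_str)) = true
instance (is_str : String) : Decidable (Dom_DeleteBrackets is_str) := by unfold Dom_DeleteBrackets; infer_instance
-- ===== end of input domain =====

-- B builds the bracket-matching map in one stack pass and joins the inner slices, instead of A's per-'(' rescan.

-- ===== PORT A =====
-- inner loop 'for j in range(i+1, str_len)' of A; js is that range (all indices in range,
-- so the .getD default is never used); early 'break' = returning the result.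
def pvInnerA (str1 : List Char) (js : List Nat) (tag : Int) (stack : List Char)
    (result : List Char) : List Char :=
  match js with
  | [] => result
  | j :: rest =>
    let c := (str1[j]?).getD ' '
    let stack := stack ++ [c]
    let tag := if c = ')' ∧ tag ≠ 0 then tag - 1 else tag
    let tag := if c = '(' ∧ tag ≠ 0 then tag + 1 else tag
    if tag = 0 then result ++ stack.dropLast      -- stack.pop(); then append each element
    else pvInnerA str1 rest tag stack result

-- result is accumulated as List Char and wrapped with String.ofList at the end;
-- range(n) = List.range n, range(i+1, n) = List.range' (i+1) (n-(i+1)) (exact for these Nat bounds).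
def DeleteBrackets (is_str : String) : String :=
  let str1 := is_str.toList
  let n := str1.length
  String.ofList ((List.range n).foldl (fun result i =>
    if (str1[i]?).getD ' ' = '(' then
      pvInnerA str1 (List.range' (i + 1) (n - (i + 1))) 1 [] result
    else result) [])

-- ===== PORT B =====
-- 'for i, c in enumerate(is_str)' with the stack/dict updates; the stack keeps its top at the
-- head (mirrors Python's append/pop at the list end); the dict has distinct keys, so an
-- association list extended at the end with first-match lookup is exact.
def pvBuildMatch (l : List Char) (p : Nat) (st : List Nat) (m : List (Nat × Nat)) :
    List Nat × List (Nat × Nat) :=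
  match l with
  | [] => (st, m)
  | c :: r =>
    if c = '(' then pvBuildMatch r (p + 1) (p :: st) m
    else if c = ')' then
      match st with
      | [] => pvBuildMatch r (p + 1) st m
      | k :: rest => pvBuildMatch r (p + 1) rest (m ++ [(k, p)])
    else pvBuildMatch r (p + 1) st m

-- is_str[i+1:j] with 0 ≤ i+1 ≤ j ≤ len: equal to drop/take (exact on these bounds).
def DeleteBrackets_alt (is_str : String) : String :=
  let cs := is_str.toList
  let m := (pvBuildMatch cs 0 [] []).2
  String.ofList (((List.range cs.length).map (fun i =>
    match m.lookup i with
    | some j => (cs.drop (i + 1)).take (j - (i + 1))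
    | none => [])).flatten)

-- ===== PRECONDITION & SPEC =====
def Spec_DeleteBrackets (is_str : String) (out : String) : Prop := out = DeleteBrackets_alt is_str
instance (is_str : String) (out : String) : Decidable (Spec_DeleteBrackets is_str out) := by unfold Spec_DeleteBrackets; infer_instance

-- ===== CLAIM (what is proved, stated in full; the proofs are below) =====
def Claim_equal_DeleteBrackets : Prop := ∀ (is_str : String), Dom_DeleteBrackets is_str → Spec_DeleteBrackets is_str (DeleteBrackets is_str)

-- ===== LEMMAS AND PROOFS =====

-- reference scan: result of A's inner loop as an Option (relative index of the matching ')')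
def pvMc : List Char → Int → Option Nat
  | [], _ => none
  | c :: r, tag =>
    let tag := if c = ')' ∧ tag ≠ 0 then tag - 1 else tag
    let tag := if c = '(' ∧ tag ≠ 0 then tag + 1 else tag
    if tag = 0 then some 0 else (pvMc r tag).map (· + 1)

-- absolute matching close position of the '(' at k
def pvAm (cs : List Char) (k : Nat) : Option Nat :=
  (pvMc (cs.drop (k + 1)) 1).map (fun d => k + 1 + d)

-- the chunk A's outer iteration i contributes
def pvGA (cs : List Char) (i : Nat) : List Char :=
  if (cs[i]?).getD ' ' = '(' then
    match pvMc (cs.drop (i + 1)) 1 with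
    | some d => (cs.drop (i + 1)).take d
    | none => []
  else []

lemma pvMc_some_lt {l : List Char} {tag : Int} {d : Nat} (h : pvMc l tag = some d) :
    d < l.length := by
  induction l generalizing tag d with
  | nil => simp [pvMc] at h
  | cons c r ih =>
    simp only [pvMc] at h
    split_ifs at h
    all_goals
      first
      | (obtain ⟨d', hd', rfl⟩ := Option.map_eq_some_iff.mp h
         have := ih hd'
         simp only [List.length_cons]
         omega)
      | (have hd := (Option.some.inj h).symm
         subst hd
         simp)

lemma pvMc_open {r : List Char} {tag : Int} (h : 0 < tag) :
    pvMc ('(' :: r) tag = (pvMc r (tag + 1)).map (· + 1) := by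
  simp only [pvMc]
  split_ifs with h1 h2 h3 <;> simp_all <;> omega

lemma pvMc_close_one {r : List Char} : pvMc (')' :: r) 1 = some 0 := by
  simp [pvMc]

lemma pvMc_close_gt {r : List Char} {tag : Int} (h : 1 < tag) :
    pvMc (')' :: r) tag = (pvMc r (tag - 1)).map (· + 1) := by
  simp only [pvMc]
  split_ifs with h1 h2 h3 <;> simp_all <;> omega

lemma pvMc_other {r : List Char} {c : Char} {tag : Int} (hc1 : c ≠ '(') (hc2 : c ≠ ')')
    (h : 0 < tag) : pvMc (c :: r) tag = (pvMc r tag).map (· + 1) := by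
  simp only [pvMc]
  split_ifs with h1 h2 h3 <;> simp_all <;> omega

-- A's inner loop, characterized by the reference scan
lemma pvInnerA_eq (cs : List Char) :
    ∀ (l : List Char) (p : Nat) (tag : Int) (stack result : List Char),
      cs.drop p = l →
      pvInnerA cs (List.range' p l.length) tag stack result =
        match pvMc l tag with
        | some d => result ++ (stack ++ l.take (d + 1)).dropLast
        | none => result := by
  intro l
  induction l with
  | nil => intro p tag stack result _; simp [pvInnerA, pvMc]
  | cons c r ih =>
    intro p tag stack result hdrop
    have hcp : cs[p]? = some c := by
      have : (cs.drop p)[0]? = cs[p + 0]? := List.getElem?_drop ..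
      simpa [hdrop] using this.symm
    have hdrop' : cs.drop (p + 1) = r := by
      have : cs.drop (p + 1) = (cs.drop p).drop 1 := by
        rw [List.drop_drop]
      simp [this, hdrop]
    simp only [List.length_cons, List.range'_succ, pvInnerA, hcp, Option.getD_some, pvMc]
    split_ifs with h1 h2 h3 <;>
      [skip;
       (rw [ih (p + 1) _ _ _ hdrop']; cases hmc : pvMc r ((tag - 1) + 1) with
        | none => simp [hmc]
        | some d => simp [hmc, List.take_succ_cons]);
       skip;
       (rw [ih (p + 1) _ _ _ hdrop']; cases hmc : pvMc r (tag - 1) with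
        | none => simp [hmc]
        | some d => simp [hmc, List.take_succ_cons]);
       skip;
       (rw [ih (p + 1) _ _ _ hdrop']; cases hmc : pvMc r (tag + 1) with
        | none => simp [hmc]
        | some d => simp [hmc, List.take_succ_cons]);
       skip;
       (rw [ih (p + 1) _ _ _ hdrop']; cases hmc : pvMc r tag with
        | none => simp [hmc]
        | some d => simp [hmc, List.take_succ_cons])] <;>
      simp

lemma pvLookup_append (m : List (Nat × Nat)) (k p i : Nat) :
    (m ++ [(k, p)]).lookup i = ((m.lookup i).or (if i = k then some p else none)) := by
  induction m with
  | nil =>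
    by_cases h : i = k
    · simp [List.lookup, h]
    · have hb : (i == k) = false := by simp [h]
      simp [List.lookup, hb, h]
  | cons a m ih =>
    by_cases h : i = a.1
    · simp [List.lookup, h]
    · have hb : (i == a.1) = false := by simp [h]
      simp [List.lookup, hb, ih]

-- B's stack pass: the final map contains exactly the matched '(' positions with their closes
lemma pvBuildMatch_lookup (cs : List Char) :
    ∀ (l : List Char) (p : Nat) (st : List Nat) (m : List (Nat × Nat)),
      cs.drop p = l →
      (∀ k ∈ st, k < p ∧ cs[k]? = some '(') →
      st.Pairwise (· > ·) →
      (∀ t (ht : t < st.length), pvAm cs st[t] = (pvMc l ((t : Int) + 1)).map (fun d => p + d)) →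
      (∀ i j, m.lookup i = some j ↔ (i < p ∧ cs[i]? = some '(' ∧ i ∉ st ∧ pvAm cs i = some j)) →
      ∀ i j, ((pvBuildMatch l p st m).2.lookup i = some j ↔
        (cs[i]? = some '(' ∧ pvAm cs i = some j)) := by
  intro l
  induction l with
  | nil =>
    intro p st m hdrop hst hpw hdepth hm i j
    have hlen : cs.length ≤ p := by
      have := congrArg List.length hdrop
      simp at this; omega
    simp only [pvBuildMatch]
    rw [hm i j]
    constructor
    · rintro ⟨_, h2, _, h4⟩; exact ⟨h2, h4⟩
    · rintro ⟨h2, h4⟩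
      have hip : i < p := by
        rcases List.getElem?_eq_some_iff.mp h2 with ⟨h', _⟩
        omega
      refine ⟨hip, h2, ?_, h4⟩
      intro hmem
      rcases List.mem_iff_getElem.mp hmem with ⟨t, ht, rfl⟩
      have := hdepth t ht
      simp [pvMc] at this
      rw [h4] at this; simp at this
  | cons c r ih =>
    intro p st m hdrop hst hpw hdepth hm i j
    have hcp : cs[p]? = some c := by
      have : (cs.drop p)[0]? = cs[p + 0]? := List.getElem?_drop ..
      simpa [hdrop] using this.symm
    have hdrop' : cs.drop (p + 1) = r := by
      have : cs.drop (p + 1) = (cs.drop p).drop 1 := by rw [List.drop_drop]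
      simp [this, hdrop]
    by_cases hc1 : c = '('
    · -- push p
      subst hc1
      simp only [pvBuildMatch, reduceIte]
      apply ih (p + 1) (p :: st) m hdrop'
      · intro k hk
        rcases List.mem_cons.mp hk with h | h
        · exact ⟨by omega, by rw [h]; exact hcp⟩
        · have := hst k h; exact ⟨by omega, this.2⟩
      · exact List.pairwise_cons.mpr ⟨fun k hk => (hst k hk).1, hpw⟩
      · intro t ht
        cases t with
        | zero => simp [pvAm, hdrop']
        | succ t =>
          have ht' : t < st.length := by simpa using ht
          have := hdepth t ht'
          rw [pvMc_open (by positivity)] at this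
          simp only [List.getElem_cons_succ]
          rw [this, Option.map_map]
          have harith : ((t : Int) + 1 + 1) = (((t : Nat) + 1 : Nat) : Int) + 1 := by push_cast; ring
          rw [← harith]
          congr 1
          funext d; simp [Function.comp]; omega
      · intro i' j'
        rw [hm i' j']
        constructor
        · rintro ⟨h1, h2, h3, h4⟩
          refine ⟨by omega, h2, ?_, h4⟩
          intro hmem
          rcases List.mem_cons.mp hmem with rfl | hmem
          · omega
          · exact h3 hmem
        · rintro ⟨h1, h2, h3, h4⟩
          have hip : i' ≠ p := fun h => h3 (h ▸ List.mem_cons_self ..)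
          exact ⟨by omega, h2, fun hmem => h3 (List.mem_cons_of_mem _ hmem), h4⟩
    · by_cases hc2 : c = ')'
      · subst hc2
        cases st with
        | nil =>
          simp only [pvBuildMatch, reduceIte]
          apply ih (p + 1) [] m hdrop'
          · intro k hk; simp at hk
          · simp
          · intro t ht; simp at ht
          · intro i' j'
            rw [hm i' j']
            constructor
            · rintro ⟨h1, h2, h3, h4⟩; exact ⟨by omega, h2, h3, h4⟩
            · rintro ⟨h1, h2, h3, h4⟩
              refine ⟨?_, h2, h3, h4⟩
              rcases Nat.lt_or_ge i' p with h | h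
              · exact h
              · exfalso
                have : i' = p := by omega
                rw [this, hcp] at h2
                exact absurd (Option.some.inj h2) (by decide)
        | cons k rest =>
          have hk0 := hdepth 0 (by simp)
          simp only [Nat.cast_zero, zero_add, pvMc_close_one, Option.map_some,
            List.getElem_cons_zero] at hk0
          have hkst := hst k (List.mem_cons_self ..)
          simp only [pvBuildMatch, reduceIte]
          apply ih (p + 1) rest (m ++ [(k, p)]) hdrop'
          · intro k' hk'
            have := hst k' (List.mem_cons_of_mem _ hk')
            exact ⟨by omega, this.2⟩
          · exact (List.pairwise_cons.mp hpw).2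
          · intro t ht
            have ht' : t + 1 < (k :: rest).length := by simpa using ht
            have := hdepth (t + 1) ht'
            rw [pvMc_close_gt (by push_cast; omega)] at this
            simp only [List.getElem_cons_succ] at this
            have harith : ((((t : Nat) + 1 : Nat) : Int) + 1 - 1) = (t : Int) + 1 := by push_cast; ring
            rw [harith, Option.map_map] at this
            rw [this]
            congr 1
            funext d; simp [Function.comp]; omega
          · intro i' j'
            rw [pvLookup_append]
            have hknotrest : k ∉ rest := by
              intro hmem
              have := (List.pairwise_cons.mp hpw).1 k hmem
              omega
            constructor
            · intro h
              rcases Option.or_eq_some_iff.mp h with h | ⟨hnone, h⟩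
              · have := (hm i' j').mp h
                refine ⟨by omega, this.2.1, ?_, this.2.2.2⟩
                intro hmem; exact this.2.2.1 (List.mem_cons_of_mem _ hmem)
              · by_cases he : i' = k
                · rw [if_pos he] at h
                  have hj : j' = p := (Option.some.inj h).symm
                  subst hj
                  subst he
                  exact ⟨by omega, hkst.2, hknotrest, by simpa using hk0⟩
                · rw [if_neg he] at h
                  simp at h
            · rintro ⟨h1, h2, h3, h4⟩
              by_cases he : i' = k
              · subst he
                have hmnone : m.lookup i' = none := by
                  cases hml : m.lookup i' with
                  | none => rfl
                  | some j'' =>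
                    have := (hm i' j'').mp hml
                    exact absurd (List.mem_cons_self ..) this.2.2.1
                have : j' = p := by
                  rw [hk0] at h4; exact (Option.some.inj h4).symm
                simp [Option.or, hmnone, this]
              · have hip : i' ≠ p := by
                  intro h; rw [h, hcp] at h2
                  exact absurd (Option.some.inj h2) (by simpa using hc1)
                have : m.lookup i' = some j' := by
                  rw [hm i' j']
                  refine ⟨by omega, h2, ?_, h4⟩
                  intro hmem
                  rcases List.mem_cons.mp hmem with rfl | hmem
                  · exact he rfl
                  · exact h3 hmem
                simp [Option.or, this]
      · -- other character
        simp only [pvBuildMatch, if_neg hc1, if_neg hc2]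
        apply ih (p + 1) st m hdrop'
        · intro k hk; have := hst k hk; exact ⟨by omega, this.2⟩
        · exact hpw
        · intro t ht
          have := hdepth t ht
          rw [pvMc_other hc1 hc2 (by positivity)] at this
          rw [this, Option.map_map]
          congr 1
          funext d; simp [Function.comp]; omega
        · intro i' j'
          rw [hm i' j']
          constructor
          · rintro ⟨h1, h2, h3, h4⟩; exact ⟨by omega, h2, h3, h4⟩
          · rintro ⟨h1, h2, h3, h4⟩
            refine ⟨?_, h2, h3, h4⟩
            rcases Nat.lt_or_ge i' p with h | h
            · exact h
            · exfalso
              have : i' = p := by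
                rcases List.getElem?_eq_some_iff.mp h2 with ⟨h', _⟩
                have hlen := congrArg List.length hdrop
                simp at hlen
                omega
              rw [this, hcp] at h2
              exact hc1 (Option.some.inj h2)

-- the whole-map characterization at the top level
lemma pvMatchMap_lookup (cs : List Char) (i j : Nat) :
    ((pvBuildMatch cs 0 [] []).2.lookup i = some j) ↔
      (cs[i]? = some '(' ∧ pvAm cs i = some j) := by
  apply pvBuildMatch_lookup cs cs 0 [] []
  · simp
  · intro k hk; simp at hk
  · simp
  · intro t ht; simp at ht
  · intro i' j'; simp [List.lookup]

lemma pvTake_dropLast {l : List Char} {d : Nat} (h : d < l.length) :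
    (l.take (d + 1)).dropLast = l.take d := by
  rw [List.dropLast_eq_take, List.length_take, List.take_take]
  congr 1
  omega

-- each outer-loop step of A appends pvGA
lemma pvStepA_eq (cs : List Char) (result : List Char) (i : Nat) :
    (if (cs[i]?).getD ' ' = '(' then
        pvInnerA cs (List.range' (i + 1) (cs.length - (i + 1))) 1 [] result
      else result) = result ++ pvGA cs i := by
  by_cases h : (cs[i]?).getD ' ' = '('
  · rw [if_pos h]
    have hlen : cs.length - (i + 1) = (cs.drop (i + 1)).length := by simp
    rw [hlen, pvInnerA_eq cs (cs.drop (i + 1)) (i + 1) 1 [] result rfl]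
    unfold pvGA
    rw [if_pos h]
    cases hmc : pvMc (cs.drop (i + 1)) 1 with
    | none => simp
    | some d => simp [pvTake_dropLast (pvMc_some_lt hmc)]
  · rw [if_neg h]; unfold pvGA; rw [if_neg h]; simp

-- A's per-position chunk equals B's per-position chunk
lemma pvChunk_eq (cs : List Char) (i : Nat) (hi : i < cs.length) :
    pvGA cs i = (match (pvBuildMatch cs 0 [] []).2.lookup i with
      | some j => (cs.drop (i + 1)).take (j - (i + 1))
      | none => ([] : List Char)) := by
  have hcs : cs[i]? = some cs[i] := List.getElem?_eq_some_iff.mpr ⟨hi, rfl⟩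
  by_cases hc : cs[i] = '('
  · cases hmc : pvMc (cs.drop (i + 1)) 1 with
    | some d =>
      have hl : (pvBuildMatch cs 0 [] []).2.lookup i = some (i + 1 + d) := by
        rw [pvMatchMap_lookup]
        exact ⟨by rw [hcs, hc], by simp [pvAm, hmc]⟩
      rw [hl]
      unfold pvGA
      rw [hcs]
      simp [hc, hmc]
    | none =>
      have hl : (pvBuildMatch cs 0 [] []).2.lookup i = none := by
        cases h : (pvBuildMatch cs 0 [] []).2.lookup i with
        | none => rfl
        | some j =>
          have := (pvMatchMap_lookup cs i j).mp h
          simp [pvAm, hmc] at this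
      rw [hl]
      unfold pvGA
      rw [hcs]
      simp [hc, hmc]
  · have hl : (pvBuildMatch cs 0 [] []).2.lookup i = none := by
      cases h : (pvBuildMatch cs 0 [] []).2.lookup i with
      | none => rfl
      | some j =>
        have := (pvMatchMap_lookup cs i j).mp h
        rw [hcs] at this
        exact (hc (Option.some.inj this.1)).elim
    rw [hl]
    unfold pvGA
    rw [hcs]
    simp [hc]

-- ===== VERDICT (by name: the statement is the Claim_ definition above) =====
theorem DeleteBrackets_spec : Claim_equal_DeleteBrackets := by
  intro is_str _
  unfold Spec_DeleteBrackets DeleteBrackets DeleteBrackets_alt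
  set cs := is_str.toList with hcs
  simp only []
  congr 1
  have hstep : (fun (result : List Char) (i : Nat) =>
      if (cs[i]?).getD ' ' = '(' then
        pvInnerA cs (List.range' (i + 1) (cs.length - (i + 1))) 1 [] result
      else result) = fun result i => result ++ pvGA cs i := by
    funext result i
    exact pvStepA_eq cs result i
  rw [hstep, PySem.List.foldl_append_eq_flatMap, List.flatMap_def]
  simp only [List.nil_append]
  congr 1
  apply List.map_congr_left
  intro i hi
  exact pvChunk_eq cs i (List.mem_range.mp hi)
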